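-- pv_equiv track=rewrite | github.com/EBI-Metagenomics/EukCC | eukcc/refine.py | connected_bins
-- ===== SOURCE A (Python) =====
-- def connected_bins(name, link_table, min_links):
--     connected = set()
--     for name1, d in link_table.items():
--         for name2, links in d.items():
--             if name1 == name2:
--                 continue
--             if name1 == name or name2 == name:
--                 if links >= min_links:
--                     n = name2 if name1 == name else name1
--                     connected.add(n)
--     return connected
-- ===== SOURCE B (Python) =====
-- def connected_bins(name, link_table, min_links):
--     connected = set()
--     for name1, d in link_table.items():
--         if name1 == name:
--             connected.update(n2 for n2, links in d.items()
--                              if n2 != name and links >= min_links)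
--         else:
--             links = d.get(name)
--             if links is not None and links >= min_links:
--                 connected.add(name1)
--     return connected
-- ===== Notes on version B (the rewrite author's own statement) =====
-- stated objective: alternative
-- what changed: Replaces the nested double loop over all (row, entry) pairs by a single pass over rows that bulk-filters the row keyed by `name` and uses a reverse dict lookup d.get(name) for every other row, so the inner scan disappears.
import Mathlib
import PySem

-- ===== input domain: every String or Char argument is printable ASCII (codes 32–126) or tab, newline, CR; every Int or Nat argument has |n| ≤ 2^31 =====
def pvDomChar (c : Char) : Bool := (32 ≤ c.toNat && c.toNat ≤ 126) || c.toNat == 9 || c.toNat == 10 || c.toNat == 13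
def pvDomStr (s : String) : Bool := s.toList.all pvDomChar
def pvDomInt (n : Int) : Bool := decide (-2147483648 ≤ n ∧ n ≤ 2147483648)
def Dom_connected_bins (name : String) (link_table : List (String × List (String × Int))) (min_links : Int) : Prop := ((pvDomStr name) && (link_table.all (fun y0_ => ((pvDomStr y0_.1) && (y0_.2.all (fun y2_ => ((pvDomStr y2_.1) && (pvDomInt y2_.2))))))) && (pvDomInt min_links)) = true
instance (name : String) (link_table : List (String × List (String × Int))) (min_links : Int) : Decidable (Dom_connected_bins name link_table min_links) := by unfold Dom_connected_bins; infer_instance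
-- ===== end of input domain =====

-- B replaces A's nested double loop by one pass over rows: the row keyed by `name` is
-- bulk-filtered, every other row is handled by a reverse lookup d.get(name) (alternative decomposition).


-- ===== PORT A =====
-- body of A's inner loop (one (name2, links) entry), kept as a helper
def cbStepA (name : String) (min_links : Int) (name1 : String)
    (connected : PySem.Set String) (q : String × Int) : PySem.Set String :=
  if name1 == q.1 then connected
  else if name1 == name || q.1 == name then
    if q.2 ≥ min_links then
      PySem.Set.add connected (if name1 == name then q.1 else name1)
    else connected
  else connected

def connected_bins (name : String) (link_table : List (String × List (String × Int))) (min_links : Int) : List String :=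
  link_table.foldl (fun connected p => p.2.foldl (cbStepA name min_links p.1) connected) []

-- ===== PORT B =====
-- body of B's single loop (one row). d.get(name) is ported as first-match lookup on the
-- association list (exact Python dict semantics).
def cbRowB (name : String) (min_links : Int)
    (connected : PySem.Set String) (p : String × List (String × Int)) : PySem.Set String :=
  if p.1 == name then
    PySem.Set.update connected
      ((p.2.filter (fun q => q.1 != name && decide (q.2 ≥ min_links))).map Prod.fst)
  else
    match (p.2.find? (fun q => q.1 == name)).map Prod.snd with
    | some links => if links ≥ min_links then PySem.Set.add connected p.1 else connected
    | none => connected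

def connected_bins_alt (name : String) (link_table : List (String × List (String × Int))) (min_links : Int) : List String :=
  link_table.foldl (cbRowB name min_links) []

-- ===== PRECONDITION & SPEC =====
-- Pre_ states the Python dict invariant: each inner dict has pairwise-distinct keys
-- (duplicate keys cannot occur in a Python dict; only the List encoding admits them).
def Pre_connected_bins (name : String) (link_table : List (String × List (String × Int))) (min_links : Int) : Prop :=
  ∀ p ∈ link_table, (p.2.map Prod.fst).Nodup
instance (name : String) (link_table : List (String × List (String × Int))) (min_links : Int) : Decidable (Pre_connected_bins name link_table min_links) := by unfold Pre_connected_bins; infer_instance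
def pvWitness_connected_bins : String × (List (String × List (String × Int))) × Int :=
  ("a", [("a", [("b", 3), ("c", 1)]), ("b", [("a", 5)]), ("c", [("b", 2)])], 2)
def Spec_connected_bins (name : String) (link_table : List (String × List (String × Int))) (min_links : Int) (out : List String) : Prop := out = connected_bins_alt name link_table min_links
instance (name : String) (link_table : List (String × List (String × Int))) (min_links : Int) (out : List String) : Decidable (Spec_connected_bins name link_table min_links out) := by unfold Spec_connected_bins; infer_instance

-- ===== CLAIM (what is proved, stated in full; the proofs are below) =====
def Claim_equal_connected_bins : Prop := ∀ (name : String) (link_table : List (String × List (String × Int))) (min_links : Int), Dom_connected_bins name link_table min_links → Pre_connected_bins name link_table min_links → Spec_connected_bins name link_table min_links (connected_bins name link_table min_links)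

-- ===== LEMMAS AND PROOFS =====

-- A's inner loop over the row keyed by `name` is B's bulk filter-update.
theorem inner_self (name : String) (min_links : Int) (d : List (String × Int)) (s : PySem.Set String) :
    d.foldl (cbStepA name min_links name) s
    = PySem.Set.update s ((d.filter (fun q => q.1 != name && decide (q.2 ≥ min_links))).map Prod.fst) := by
  induction d generalizing s with
  | nil => rfl
  | cons q d ih =>
    rw [List.foldl_cons, ih, List.filter_cons]
    by_cases hq : name = q.1
    · simp [cbStepA, hq]
    · have h1 : (q.1 != name) = true := by simp; exact fun h => hq h.symm
      have h2 : (name == q.1) = false := by simp [hq]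
      by_cases hl : q.2 ≥ min_links
      · simp [cbStepA, h1, h2, hl, PySem.Set.update, List.map_cons]
      · simp [cbStepA, h1, h2, hl]

-- A row with no entry keyed `name`, whose own key is not `name`, contributes nothing.
theorem inner_none (name name1 : String) (hne : name1 ≠ name) (min_links : Int)
    (d : List (String × Int)) (hd : ∀ q ∈ d, q.1 ≠ name) (s : PySem.Set String) :
    d.foldl (cbStepA name min_links name1) s = s := by
  induction d generalizing s with
  | nil => rfl
  | cons q d ih =>
    have h1 : (name1 == name) = false := by simp [hne]
    have h2 : (q.1 == name) = false := by simp [hd q (List.mem_cons_self ..)]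
    rw [List.foldl_cons, ih (fun r hr => hd r (List.mem_cons_of_mem _ hr))]
    by_cases hq : name1 = q.1 <;> simp [cbStepA, hq, h1, h2]

-- A's inner loop over a row whose key is not `name` is B's reverse lookup.
theorem inner_other (name name1 : String) (hne : name1 ≠ name) (min_links : Int)
    (d : List (String × Int)) (hd : (d.map Prod.fst).Nodup) (s : PySem.Set String) :
    d.foldl (cbStepA name min_links name1) s
    = match (d.find? (fun q => q.1 == name)).map Prod.snd with
      | some links => if links ≥ min_links then PySem.Set.add s name1 else s
      | none => s := by
  induction d generalizing s with
  | nil => rfl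
  | cons q d ih =>
    have h1 : (name1 == name) = false := by simp [hne]
    have hd' : (d.map Prod.fst).Nodup := (List.nodup_cons.mp hd).2
    rw [List.foldl_cons, List.find?_cons]
    by_cases hq : q.1 = name
    · have hrest : ∀ r ∈ d, r.1 ≠ name := by
        intro r hr h
        exact (List.nodup_cons.mp hd).1 (hq ▸ h ▸ List.mem_map_of_mem hr)
      have hne1 : (name1 == q.1) = false := by
        simp; exact fun h => hne (h.trans hq)
      have h2 : (q.1 == name) = true := by simp [hq]
      rw [inner_none name name1 hne min_links d hrest]
      simp [cbStepA, hne1, h1, h2]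
    · have h2 : (q.1 == name) = false := by simp [hq]
      rw [ih hd']
      have : cbStepA name min_links name1 s q = s := by
        by_cases hn : name1 = q.1 <;> simp [cbStepA, hn, h1, h2]
      rw [this, h2]

theorem main_fold (name : String) (min_links : Int)
    (link_table : List (String × List (String × Int)))
    (h : ∀ p ∈ link_table, (p.2.map Prod.fst).Nodup) (s : PySem.Set String) :
    link_table.foldl (fun connected p => p.2.foldl (cbStepA name min_links p.1) connected) s
    = link_table.foldl (cbRowB name min_links) s := by
  induction link_table generalizing s with
  | nil => rfl
  | cons p lt ih =>
    rw [List.foldl_cons, List.foldl_cons, ih (fun r hr => h r (List.mem_cons_of_mem _ hr))]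
    congr 1
    by_cases hp : p.1 = name
    · rw [hp, inner_self name min_links p.2 s, cbRowB]
      simp [hp]
    · have hp' : (p.1 == name) = false := by simp [hp]
      rw [inner_other name p.1 hp min_links p.2 (h p (List.mem_cons_self ..)) s, cbRowB, hp']
      simp

-- ===== VERDICT (by name: the statement is the Claim_ definition above) =====
theorem connected_bins_spec : Claim_equal_connected_bins := by
  intro name link_table min_links _ hpre
  unfold Spec_connected_bins connected_bins connected_bins_alt
  exact main_fold name min_links link_table hpre []
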